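-- pv_equiv track=rewrite | github.com/mirenk0/Algorithmic-Problems | 3-EfficientAlgorithms/samebit.py | count
-- ===== SOURCE A (Python) =====
-- def count(s):
--     """How many ways can you choose 2 positions in a bit string, so that each position has same bit"""
--     n = len(s)
--     zeros = 0
--     ones = 0
--     total = 0
--
--     for bit in s:
--         if bit == '0':
--             zeros += 1
--
--         if bit == '1':
--             ones += 1
--
--     total += zeros * (zeros - 1) // 2 + ones * (ones - 1) // 2
--
--     return total
-- ===== SOURCE B (Python) =====
-- def count(s):
--     """How many ways can you choose 2 positions in a bit string, so that each position has same bit"""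
--     zeros = 0
--     ones = 0
--     total = 0
--     for bit in s:
--         if bit == '0':
--             total += zeros
--             zeros += 1
--         elif bit == '1':
--             total += ones
--             ones += 1
--     return total
-- ===== Notes on version B (the rewrite author's own statement) =====
-- stated objective: alternative
-- what changed: B accumulates pairs on the fly (each new matching bit pairs with all previously seen equal bits) instead of counting zeros/ones first and applying the closed-form C(n,2) formula with integer division afterwards.
import Mathlib
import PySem

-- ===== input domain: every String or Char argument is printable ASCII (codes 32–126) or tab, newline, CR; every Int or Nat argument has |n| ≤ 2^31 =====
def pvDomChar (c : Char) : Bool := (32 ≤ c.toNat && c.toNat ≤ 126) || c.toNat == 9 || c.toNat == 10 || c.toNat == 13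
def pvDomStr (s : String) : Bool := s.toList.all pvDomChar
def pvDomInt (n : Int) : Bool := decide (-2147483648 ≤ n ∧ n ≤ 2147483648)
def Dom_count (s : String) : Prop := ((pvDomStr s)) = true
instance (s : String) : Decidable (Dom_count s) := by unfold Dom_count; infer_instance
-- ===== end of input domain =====

-- B replaces A's count-then-C(n,2) closed form by on-the-fly pair accumulation (objective: alternative, same cost).

-- ===== PORT A =====
-- loop: two independent ifs incrementing the (zeros, ones) counters
def countLoopA (l : List Char) (zo : Int × Int) : Int × Int :=
  l.foldl (fun p bit =>
    let z := if bit = '0' then p.1 + 1 else p.1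
    let o := if bit = '1' then p.2 + 1 else p.2
    (z, o)) zo

def count (s : String) : Int :=
  let _n := PySem.Str.len s
  let zo := countLoopA s.toList (0, 0)
  let zeros := zo.1
  let ones := zo.2
  let total : Int := 0
  total + (PySem.Int.floordiv (zeros * (zeros - 1)) 2 + PySem.Int.floordiv (ones * (ones - 1)) 2)

-- ===== PORT B =====
-- loop: state (zeros, ones, total); each matching bit pairs with all previously seen equal bits
def countLoopB (l : List Char) (st : Int × Int × Int) : Int × Int × Int :=
  l.foldl (fun p bit =>
    if bit = '0' then (p.1 + 1, p.2.1, p.2.2 + p.1)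
    else if bit = '1' then (p.1, p.2.1 + 1, p.2.2 + p.2.1)
    else p) st

def count_alt (s : String) : Int :=
  (countLoopB s.toList (0, 0, 0)).2.2

-- ===== PRECONDITION & SPEC =====
def Spec_count (s : String) (out : Int) : Prop := out = count_alt s
instance (s : String) (out : Int) : Decidable (Spec_count s out) := by unfold Spec_count; infer_instance

-- ===== CLAIM (what is proved, stated in full; the proofs are below) =====
def Claim_equal_count : Prop := ∀ (s : String), Dom_count s → Spec_count s (count s)

-- ===== LEMMAS AND PROOFS =====

-- invariant linking B's running total with A's counters, doubled to avoid division
theorem count_key (l : List Char) : ∀ (z o t : Int),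
    2 * (countLoopB l (z, o, t)).2.2 + z * (z - 1) + o * (o - 1)
      = 2 * t + (countLoopA l (z, o)).1 * ((countLoopA l (z, o)).1 - 1)
          + (countLoopA l (z, o)).2 * ((countLoopA l (z, o)).2 - 1) := by
  induction l with
  | nil => intro z o t; simp [countLoopA, countLoopB]
  | cons c l ih =>
    intro z o t
    by_cases h0 : c = '0'
    · have h := ih (z + 1) o (t + z)
      subst h0
      simp only [countLoopA, countLoopB, List.foldl_cons, Char.reduceEq, reduceIte] at h ⊢
      linarith [h]
    · by_cases h1 : c = '1'
      · have h := ih z (o + 1) (t + o)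
        subst h1
        simp only [countLoopA, countLoopB, List.foldl_cons, Char.reduceEq, reduceIte] at h ⊢
        linarith [h]
      · have h := ih z o t
        simp only [countLoopA, countLoopB, List.foldl_cons, if_neg h0, if_neg h1] at h ⊢
        linarith [h]

theorem even_mul_pred (n : Int) : 2 ∣ n * (n - 1) := by
  rcases Int.even_or_odd n with ⟨k, hk⟩ | ⟨k, hk⟩
  · exact ⟨k * (n - 1), by rw [hk]; ring⟩
  · exact ⟨n * k, by rw [hk]; ring⟩

theorem fdiv_double (a : Int) (h : 2 ∣ a) : 2 * PySem.Int.floordiv a 2 = a := by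
  obtain ⟨k, hk⟩ := h
  subst hk
  rw [PySem.Int.floordiv_eq_ediv_of_pos (by omega)]
  omega

-- ===== VERDICT (by name: the statement is the Claim_ definition above) =====
theorem count_spec : Claim_equal_count := by
  intro s _
  unfold Spec_count count count_alt
  dsimp only
  set Z := (countLoopA s.toList (0, 0)).1 with hZ
  set O := (countLoopA s.toList (0, 0)).2 with hO
  have key := count_key s.toList 0 0 0
  rw [← hZ, ← hO] at key
  have hz := fdiv_double (Z * (Z - 1)) (even_mul_pred Z)
  have ho := fdiv_double (O * (O - 1)) (even_mul_pred O)
  omega
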